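-- pv_equiv track=rewrite | github.com/AnasTaherGit/Project-Euler | Problem 37/Truncatable primes - Problem 37.py | is_truncable
-- ===== SOURCE A (Python) =====
-- def is_prime(n):
--
--     if n <= 1:
--         return False
--
--     else:
--         i = 2
--         while i * i <= n:
--             if n % i == 0:
--                 return False
--             i += 1
--
--         return True
--
-- def is_truncable(n, d):
--     if d == 'right':
--         if len(str(n)) == 1:
--             return is_prime(n)
--
--         else:
--             if is_prime(n):
--                 return is_truncable(n // 10, 'right')
--             else:
--                 return False
--     else:
--         if len(str(n)) == 1:
--             return is_prime(n)
--
--         else: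
--             if is_prime(n):
--                 return is_truncable(n % 10**(len(str(n)) - 1), 'left')
--             else:
--                 return False
-- ===== SOURCE B (Python) =====
-- def is_prime(n):
--     if n < 2:
--         return False
--     d = 2
--     while d * d <= n and n % d != 0:
--         d += 1
--     return d * d > n
--
-- def truncations(n, d):
--     parts = [n]
--     if d == 'right':
--         t = n
--         while t <= -10 or t >= 10:
--             t //= 10
--             parts.append(t)
--     else:
--         m = 10
--         while m <= n:
--             parts.append(n % m)
--             m *= 10
--     return parts
--
-- def is_truncable(n, d):
--     return all(is_prime(p) for p in truncations(n, d))
-- ===== Notes on version B (the rewrite author's own statement) =====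
-- stated objective: alternative
-- what changed: Replaces A's string-driven recursion (len(str(n)) tests and a 10**(len(str(n))-1) modulus at every level) with one eager pass that builds the whole list of truncations arithmetically (repeated //10 for 'right'; n % 10, n % 100, ... for 'left') and then tests them all with all(is_prime(...)); the primality test is a single-condition loop with no early returns that reports via the final divisor.
import Mathlib
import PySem

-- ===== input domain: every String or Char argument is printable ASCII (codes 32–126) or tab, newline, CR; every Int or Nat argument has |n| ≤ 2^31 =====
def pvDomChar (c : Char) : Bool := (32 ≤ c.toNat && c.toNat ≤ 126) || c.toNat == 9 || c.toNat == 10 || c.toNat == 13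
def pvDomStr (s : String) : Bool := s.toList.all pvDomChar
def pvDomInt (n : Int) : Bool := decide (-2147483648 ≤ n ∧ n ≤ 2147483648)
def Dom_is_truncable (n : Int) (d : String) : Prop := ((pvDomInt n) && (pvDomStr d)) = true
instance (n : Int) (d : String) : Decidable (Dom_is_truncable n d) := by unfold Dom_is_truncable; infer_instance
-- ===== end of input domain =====

-- B replaces A's string-driven recursion by one eager pass that BUILDS the list of all
-- truncations arithmetically (repeated //10 for 'right', n % 10, n % 100, … for 'left')
-- and then tests all of them with all(is_prime(...)); same return value everywhere.

-- ===== PORT A =====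
-- termination fact cited by both trial-division loops: i*i ≤ n forces i ≤ n
theorem pv_dec_sq (n i : Int) (h : i * i ≤ n) : (n + 1 - (i + 1)).toNat < (n + 1 - i).toNat := by
  have hn : (0:Int) ≤ n := le_trans (mul_self_nonneg i) h
  have hi : i ≤ n := by
    rcases le_total i 0 with h0 | h0
    · exact le_trans h0 hn
    · rcases eq_or_lt_of_le h0 with h1 | h1
      · exact h1 ▸ hn
      · exact le_trans ((le_mul_iff_one_le_left h1).2 (by omega)) h
  omega

-- while i*i <= n: … i += 1
def is_prime_loop (n i : Int) : Bool :=
  if h : i * i ≤ n then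
    if PySem.Int.mod n i = 0 then false
    else is_prime_loop n (i + 1)
  else true
termination_by (n + 1 - i).toNat
decreasing_by
  exact pv_dec_sq n i h

def is_prime (n : Int) : Bool :=
  if n ≤ 1 then false else is_prime_loop n 2

-- facts the ports' termination proofs cite
theorem is_prime_ge_two (n : Int) (h : is_prime n = true) : 2 ≤ n := by
  unfold is_prime at h; split at h
  · exact absurd h (by simp)
  · omega

theorem toDigitsCore_len (f : Nat) : ∀ n : Nat, n < f →
    (Nat.toDigitsCore 10 f n []).length = Nat.log 10 n + 1 := by
  induction f with
  | zero => intro n h; omega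
  | succ f ih =>
    intro n h
    rw [Nat.toDigitsCore]
    by_cases h0 : n / 10 = 0
    · simp only [h0, if_true]
      have h10 : n < 10 := Nat.lt_of_div_eq_zero (by norm_num) h0
      simp [Nat.log_eq_zero_iff.2 (Or.inl h10)]
    · simp only [h0, if_false]
      rw [Nat.toDigitsCore_lens_eq]
      have hn0 : 0 < n := Nat.pos_of_ne_zero (fun hz => h0 (by rw [hz]))
      have hlt : n / 10 < f :=
        lt_of_lt_of_le (Nat.div_lt_self hn0 (by norm_num)) (Nat.lt_succ_iff.1 h)
      rw [ih _ hlt]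
      have h10 : 10 ≤ n := (Nat.div_ne_zero_iff.1 h0).2
      have hpos : 0 < Nat.log 10 n := Nat.log_pos (by norm_num) h10
      rw [Nat.log_div_base 10 n, Nat.sub_add_cancel hpos]

theorem toChars_len_nonneg (n : Int) (h : 0 ≤ n) :
    (PySem.Int.toChars n).length = Nat.log 10 n.toNat + 1 := by
  rw [PySem.Int.toChars, if_neg (by omega), Nat.toDigits]
  exact toDigitsCore_len _ _ (Nat.lt_succ_self _)

theorem toChars_len_one_iff (n : Int) :
    (PySem.Int.toChars n).length = 1 ↔ 0 ≤ n ∧ n ≤ 9 := by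
  rcases lt_or_ge n 0 with h | h
  · rw [PySem.Int.toChars, if_pos h]
    simp only [List.length_cons]
    rw [Nat.toDigits]
    have := toDigitsCore_len (n.natAbs + 1) n.natAbs (Nat.lt_succ_self _)
    constructor
    · intro hc; omega
    · intro hc; omega
  · rw [toChars_len_nonneg n h]
    have hiff := Nat.log_eq_zero_iff (b := 10) (n := n.toNat)
    constructor
    · intro hc
      have : Nat.log 10 n.toNat = 0 := by omega
      have := hiff.1 this
      omega
    · intro hc
      have : n.toNat < 10 := by omega
      rw [Nat.log_eq_zero_iff.2 (Or.inl this)]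

theorem ten_pow_le_self (n : Int) (h2 : 2 ≤ n)
    (hL : (PySem.Int.toChars n).length ≠ 1) :
    10 ≤ n ∧ (10:Int) ^ ((PySem.Int.toChars n).length - 1) ≤ n := by
  have h0 : (0:Int) ≤ n := le_trans (by norm_num) h2
  have hlen := toChars_len_nonneg n h0
  have hlog : 0 < Nat.log 10 n.toNat := by
    rcases Nat.eq_zero_or_pos (Nat.log 10 n.toNat) with hz | hp
    · refine absurd ((toChars_len_one_iff n).2 ⟨h0, ?_⟩) hL
      have h9 := Nat.log_eq_zero_iff.1 hz
      omega
    · exact hp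
  have hle : 10 ^ Nat.log 10 n.toNat ≤ n.toNat := Nat.pow_log_le_self 10 (by omega)
  have h10 : (10:ℕ) ≤ 10 ^ Nat.log 10 n.toNat := Nat.le_self_pow (by omega) 10
  have hcast : ((10 ^ Nat.log 10 n.toNat : ℕ) : Int) = (10:Int) ^ Nat.log 10 n.toNat := by
    push_cast; ring
  have hkey : ((10 ^ Nat.log 10 n.toNat : ℕ) : Int) ≤ n := by
    rw [← Int.toNat_of_nonneg h0]
    exact Int.ofNat_le.2 hle
  constructor
  · exact le_trans (by exact_mod_cast Int.ofNat_le.2 h10) hkey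
  · rw [hlen, Nat.add_sub_cancel, ← hcast]
    exact hkey

-- the two decreasing facts is_truncable's recursion cites
theorem pv_decA1 (n : Int) (hL : (PySem.Int.toChars n).length ≠ 1) (hp : is_prime n = true) :
    (PySem.Int.floordiv n 10).toNat < n.toNat := by
  have h2 := is_prime_ge_two n hp
  have h10 := (ten_pow_le_self n h2 hL).1
  have hn0 : (0:Int) < n := lt_of_lt_of_le (by norm_num) h10
  rw [PySem.Int.floordiv_eq_ediv_of_pos (by norm_num)]
  exact (Int.toNat_lt_toNat hn0).2
    ((Int.ediv_lt_iff_lt_mul (by norm_num)).2 ((lt_mul_iff_one_lt_right hn0).2 (by norm_num)))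

theorem pv_decA2 (n : Int) (hL : (PySem.Int.toChars n).length ≠ 1) (hp : is_prime n = true) :
    (PySem.Int.mod n ((10:Int) ^ ((PySem.Int.toChars n).length - 1))).toNat < n.toNat := by
  have h2 := is_prime_ge_two n hp
  obtain ⟨h10, hpow⟩ := ten_pow_le_self n h2 hL
  have hn0 : (0:Int) < n := lt_of_lt_of_le (by norm_num) h10
  have hposp : (0:Int) < 10 ^ ((PySem.Int.toChars n).length - 1) := by positivity
  exact (Int.toNat_lt_toNat hn0).2 (lt_of_lt_of_le (PySem.Int.mod_lt (a := n) hposp) hpow)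

def is_truncable (n : Int) (d : String) : Bool :=
  if d = "right" then
    if (PySem.Int.toChars n).length = 1 then is_prime n
    else
      if is_prime n then is_truncable (PySem.Int.floordiv n 10) "right"
      else false
  else
    if (PySem.Int.toChars n).length = 1 then is_prime n
    else
      if is_prime n then
        is_truncable (PySem.Int.mod n ((10:Int) ^ ((PySem.Int.toChars n).length - 1))) "left"
      else false
termination_by n.toNat
decreasing_by
  · rename_i _dd hL hp
    exact pv_decA1 n hL hp
  · rename_i _dd hL hp
    exact pv_decA2 n hL hp

-- ===== PORT B =====
-- d = 2; while d*d <= n and n % d != 0: d += 1   — returns the final d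
def prime_dloop (n d : Int) : Int :=
  if h : d * d ≤ n ∧ PySem.Int.mod n d ≠ 0 then prime_dloop n (d + 1) else d
termination_by (n + 1 - d).toNat
decreasing_by
  exact pv_dec_sq n d h.1

def is_prime_alt (n : Int) : Bool :=
  if n < 2 then false
  else decide (n < prime_dloop n 2 * prime_dloop n 2)

-- t = n; while t <= -10 or t >= 10: t //= 10; parts.append(t)
theorem pv_dec_div10 (t : Int) (h : t ≤ -10 ∨ 10 ≤ t) :
    (PySem.Int.floordiv t 10).natAbs < t.natAbs := by
  rw [PySem.Int.floordiv_eq_ediv_of_pos (by norm_num)]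
  omega

def rightLoop (t : Int) : List Int :=
  if h : t ≤ -10 ∨ 10 ≤ t then
    PySem.Int.floordiv t 10 :: rightLoop (PySem.Int.floordiv t 10)
  else []
termination_by t.natAbs
decreasing_by
  exact pv_dec_div10 t h

-- m = 10; while m <= n: parts.append(n % m); m *= 10   (hm is a proof argument keeping the loop total)
theorem pv_dec_mul10 (m n : Int) (h : 1 ≤ m ∧ m ≤ n) :
    (n + 1 - m * 10).toNat < (n + 1 - m).toNat := by omega

def leftLoop (m n : Int) : List Int :=
  if h : 1 ≤ m ∧ m ≤ n then PySem.Int.mod n m :: leftLoop (m * 10) n else []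
termination_by (n + 1 - m).toNat
decreasing_by
  exact pv_dec_mul10 m n h

def truncations_alt (n : Int) (d : String) : List Int :=
  n :: (if d = "right" then rightLoop n else leftLoop 10 n)

def is_truncable_alt (n : Int) (d : String) : Bool :=
  (truncations_alt n d).all is_prime_alt

-- ===== PRECONDITION & SPEC =====
def Spec_is_truncable (n : Int) (d : String) (out : Bool) : Prop := out = is_truncable_alt n d
instance (n : Int) (d : String) (out : Bool) : Decidable (Spec_is_truncable n d out) := by unfold Spec_is_truncable; infer_instance

-- ===== CLAIM (what is proved, stated in full; the proofs are below) =====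
def Claim_equal_is_truncable : Prop := ∀ (n : Int) (d : String), Dom_is_truncable n d → Spec_is_truncable n d (is_truncable n d)

-- ===== LEMMAS AND PROOFS =====

theorem loopA_iff (n : Int) : ∀ i : Int, 0 ≤ i →
    (is_prime_loop n i = true ↔
      ∀ j : Int, i ≤ j → j * j ≤ n → PySem.Int.mod n j ≠ 0) := by
  intro i
  induction i using is_prime_loop.induct (n := n) with
  | case1 i h hm =>
    intro _
    rw [is_prime_loop, dif_pos h, if_pos hm]
    simp only [Bool.false_eq_true, false_iff, not_forall]
    exact ⟨i, le_rfl, h, by simp [hm]⟩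
  | case2 i h hm ih =>
    intro hi
    rw [is_prime_loop, dif_pos h, if_neg hm, ih (by omega)]
    constructor
    · intro hall j hj hjj
      rcases eq_or_lt_of_le hj with rfl | hlt
      · exact hm
      · exact hall j (by omega) hjj
    · intro hall j hj hjj
      exact hall j (by omega) hjj
  | case3 i h =>
    intro hi
    rw [is_prime_loop, dif_neg h]
    simp only [true_iff]
    intro j hj hjj _
    exact h (le_trans (mul_self_le_mul_self hi hj) hjj)

theorem dloop_iff (n : Int) : ∀ d : Int, 0 ≤ d →
    (n < prime_dloop n d * prime_dloop n d ↔
      ∀ j : Int, d ≤ j → j * j ≤ n → PySem.Int.mod n j ≠ 0) := by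
  intro d
  induction d using prime_dloop.induct (n := n) with
  | case1 d h ih =>
    intro hd
    rw [prime_dloop, dif_pos h, ih (by omega)]
    constructor
    · intro hall j hj hjj
      rcases eq_or_lt_of_le hj with rfl | hlt
      · exact h.2
      · exact hall j (by omega) hjj
    · intro hall j hj hjj
      exact hall j (by omega) hjj
  | case2 d h =>
    intro hd
    rw [prime_dloop, dif_neg h]
    push_neg at h
    by_cases hdd : d * d ≤ n
    · have hm := h hdd
      constructor
      · intro hlt; omega
      · intro hall
        exact absurd hm (hall d le_rfl hdd)
    · constructor
      · intro _ j hj hjj _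
        exact hdd (le_trans (mul_self_le_mul_self hd hj) hjj)
      · intro _; omega

theorem prime_eq (n : Int) : is_prime n = is_prime_alt n := by
  unfold is_prime is_prime_alt
  rcases lt_or_ge n 2 with h2 | h2
  · rw [if_pos (by omega), if_pos h2]
  · rw [if_neg (by omega), if_neg (by omega)]
    rw [Bool.eq_iff_iff, loopA_iff n 2 (by norm_num), decide_eq_true_iff,
      dloop_iff n 2 (by norm_num)]

theorem right_eq (n : Int) :
    is_truncable n "right" = (n :: rightLoop n).all is_prime_alt := by
  rw [is_truncable, if_pos rfl, List.all_cons]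
  by_cases hL : (PySem.Int.toChars n).length = 1
  · obtain ⟨h0, h9⟩ := (toChars_len_one_iff n).1 hL
    rw [if_pos hL, rightLoop, dif_neg (by omega), prime_eq]
    simp
  · rw [if_neg hL]
    by_cases hp : is_prime n = true
    · have h2 := is_prime_ge_two n hp
      have h10 := (ten_pow_le_self n h2 hL).1
      rw [if_pos hp, rightLoop, dif_pos (by omega), List.all_cons, ← List.all_cons]
      rw [prime_eq] at hp
      rw [hp, Bool.true_and]
      exact right_eq (PySem.Int.floordiv n 10)
    · rw [if_neg hp, prime_eq] at *
      simp [Bool.not_eq_true] at hp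
      rw [hp, Bool.false_and]
termination_by n.natAbs
decreasing_by
  rw [PySem.Int.floordiv_eq_ediv_of_pos (by norm_num)]
  omega

-- the common specification of the 'left' side: n itself and every suffix n % 10^(k+1) prime
def LSpec (n : Int) : Prop :=
  is_prime_alt n = true ∧
    ∀ k : ℕ, (10:Int) ^ (k + 1) ≤ n →
      is_prime_alt (PySem.Int.mod n ((10:Int) ^ (k + 1))) = true

theorem n_lt_ten_pow_len (n : Int) (h0 : 0 ≤ n) :
    n < (10:Int) ^ (PySem.Int.toChars n).length := by
  rw [toChars_len_nonneg n h0]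
  have := Nat.lt_pow_succ_log_self (b := 10) (by norm_num) n.toNat
  have hc : ((10 ^ (Nat.log 10 n.toNat + 1) : ℕ) : Int) = (10:Int) ^ (Nat.log 10 n.toNat + 1) := by
    push_cast; ring
  calc n = (n.toNat : Int) := (Int.toNat_of_nonneg h0).symm
    _ < ((10 ^ (Nat.log 10 n.toNat + 1) : ℕ) : Int) := by exact_mod_cast this
    _ = _ := hc

theorem mod_pow_mod (n : Int) (j k : ℕ) (hjk : j ≤ k) :
    PySem.Int.mod (PySem.Int.mod n ((10:Int) ^ k)) ((10:Int) ^ j) =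
      PySem.Int.mod n ((10:Int) ^ j) := by
  rw [PySem.Int.mod_eq_emod_of_pos (by positivity), PySem.Int.mod_eq_emod_of_pos (by positivity),
    PySem.Int.mod_eq_emod_of_pos (by positivity)]
  exact Int.emod_emod_of_dvd n (pow_dvd_pow 10 hjk)

theorem A_left_iff (n : Int) : is_truncable n "left" = true ↔ LSpec n := by
  rw [is_truncable, if_neg (by decide)]
  by_cases hL : (PySem.Int.toChars n).length = 1
  · obtain ⟨h0, h9⟩ := (toChars_len_one_iff n).1 hL
    rw [if_pos hL, prime_eq]
    constructor
    · intro hp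
      refine ⟨hp, fun k hk => ?_⟩
      have h1 : (10:Int) ^ 1 ≤ 10 ^ (k + 1) := pow_le_pow_right₀ (by norm_num) (by omega)
      norm_num at h1
      omega
    · exact fun h => h.1
  · rw [if_neg hL]
    by_cases hp : is_prime n = true
    · have h2 := is_prime_ge_two n hp
      obtain ⟨h10, hpow⟩ := ten_pow_le_self n h2 hL
      have h0 : (0:Int) ≤ n := by omega
      have hLlen : 2 ≤ (PySem.Int.toChars n).length := by
        have := toChars_len_nonneg n h0; omega
      set L := (PySem.Int.toChars n).length with hLdef
      have hup : n < (10:Int) ^ L := n_lt_ten_pow_len n h0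
      rw [if_pos hp]
      have hLm1 : L - 1 = (L - 2) + 1 := by omega
      set r := PySem.Int.mod n ((10:Int) ^ (L - 1)) with hrdef
      have hrlt : r < (10:Int) ^ (L - 1) := by
        rw [hrdef]; exact PySem.Int.mod_lt (a := n) (by positivity)
      have hr0 : 0 ≤ r := by
        rw [hrdef]; exact PySem.Int.mod_nonneg (a := n) (by positivity)
      rw [A_left_iff r]
      unfold LSpec
      rw [prime_eq] at hp
      constructor
      · rintro ⟨hpr, hsuf⟩
        refine ⟨hp, fun k hk => ?_⟩
        have hkL : k + 1 ≤ L - 1 := by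
          by_contra hc
          have : L ≤ k + 1 := by omega
          exact absurd (lt_of_lt_of_le hup (pow_le_pow_right₀ (by norm_num) this)) (by omega)
        rcases eq_or_lt_of_le hkL with heq | hlt
        · rw [heq]; exact hpr
        · rw [← mod_pow_mod n (k+1) (L-1) (by omega), ← hrdef]
          by_cases hkr : (10:Int) ^ (k + 1) ≤ r
          · exact hsuf k hkr
          · have : PySem.Int.mod r ((10:Int) ^ (k + 1)) = r := by
              rw [PySem.Int.mod_eq_emod_of_pos (by positivity)]
              exact Int.emod_eq_of_lt hr0 (by omega)
            rw [this]; exact hpr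
      · rintro ⟨_, hsuf⟩
        have hpr : is_prime_alt r = true := by
          rw [hrdef, hLm1]; exact hsuf (L - 2) (by rw [← hLm1]; exact hpow)
        refine ⟨hpr, fun k hk => ?_⟩
        have hkL : k + 1 ≤ L - 1 := by
          have := lt_of_le_of_lt hk hrlt
          by_contra hc
          exact absurd (lt_of_lt_of_le this (pow_le_pow_right₀ (by norm_num) (by omega))) (lt_irrefl _)
        rw [hrdef, mod_pow_mod n (k+1) (L-1) (by omega)]
        exact hsuf k (le_trans hk (le_of_lt (lt_of_lt_of_le hrlt hpow)))
    · rw [if_neg hp]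
      rw [prime_eq] at hp
      simp only [Bool.false_eq_true, false_iff]
      exact fun h => hp h.1
termination_by n.natAbs
decreasing_by
  rw [← hLdef]
  rw [← hLdef] at hpow
  have hposp : (0:Int) < 10 ^ (L - 1) := by positivity
  have hm0 := PySem.Int.mod_nonneg (a := n) hposp
  have hm1 := PySem.Int.mod_lt (a := n) hposp
  omega

theorem leftLoop_all (n : Int) : ∀ (m : Int) (j : ℕ), m = (10:Int) ^ (j + 1) →
    ((leftLoop m n).all is_prime_alt = true ↔
      ∀ k : ℕ, j ≤ k → (10:Int) ^ (k + 1) ≤ n →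
        is_prime_alt (PySem.Int.mod n ((10:Int) ^ (k + 1))) = true) := by
  intro m
  induction m using leftLoop.induct (n := n) with
  | case1 m h ih =>
    rintro j rfl
    rw [leftLoop, dif_pos h, List.all_cons, Bool.and_eq_true,
      ih (j + 1) (by ring)]
    constructor
    · rintro ⟨hhd, htl⟩ k hjk hkn
      rcases eq_or_lt_of_le hjk with rfl | hlt
      · exact hhd
      · exact htl k (by omega) hkn
    · intro hall
      exact ⟨hall j le_rfl h.2, fun k hk hkn => hall k (by omega) hkn⟩
  | case2 m h =>
    rintro j rfl
    rw [leftLoop, dif_neg h]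
    simp only [List.all_nil, true_iff]
    intro k hjk hkn
    have h1 : (1:Int) ≤ 10 ^ (j + 1) := one_le_pow₀ (by norm_num)
    have h2 : (10:Int) ^ (j + 1) ≤ 10 ^ (k + 1) := pow_le_pow_right₀ (by norm_num) (by omega)
    exact absurd ⟨h1, by omega⟩ h

theorem B_left_iff (n : Int) : is_truncable_alt n "left" = true ↔ LSpec n := by
  unfold is_truncable_alt truncations_alt
  rw [if_neg (by decide), List.all_cons, Bool.and_eq_true,
    leftLoop_all n 10 0 (by norm_num)]
  unfold LSpec
  constructor
  · rintro ⟨h1, h2⟩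
    exact ⟨h1, fun k hk => h2 k (Nat.zero_le k) hk⟩
  · rintro ⟨h1, h2⟩
    exact ⟨h1, fun k _ hk => h2 k hk⟩

-- ===== VERDICT (by name: the statement is the Claim_ definition above) =====
theorem is_truncable_spec : Claim_equal_is_truncable := by
  intro n d _
  unfold Spec_is_truncable
  by_cases hd : d = "right"
  · subst hd
    rw [right_eq n]
    unfold is_truncable_alt truncations_alt
    rw [if_pos rfl]
  · have hA : is_truncable n d = is_truncable n "left" := by
      rw [is_truncable, if_neg hd]
      conv_rhs => rw [is_truncable, if_neg (by decide)]
    have hB : is_truncable_alt n d = is_truncable_alt n "left" := by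
      unfold is_truncable_alt truncations_alt
      rw [if_neg hd, if_neg (by decide)]
    rw [hA, hB, Bool.eq_iff_iff, A_left_iff, B_left_iff]
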